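-- pv_equiv track=rewrite | github.com/julianazapata12/La-carpeta | LA CARPETA/uco_was_interpreter.py | calculate_token_positions
-- ===== SOURCE A (Python) =====
-- def calculate_token_positions(input_str, tokens):
--     positions = []
--     current_position = 0
--     for token in tokens:
--         while current_position < len(input_str) and input_str[current_position] in " \n\t":
--             current_position += 1
--         start_position = current_position
--         current_position += len(token)
--         row = input_str.count('\n', 0, start_position) + 1
--         col = start_position - input_str.rfind('\n', 0, start_position)
--         positions.append((row, col))
--     return positions
-- ===== SOURCE B (Python) =====
-- def calculate_token_positions(input_str, tokens):
--     positions = []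
--     pos = 0
--     row = 0        # newlines seen in input_str[:pos]
--     last_nl = -1   # index of last newline in input_str[:pos], -1 if none
--     n = len(input_str)
--     for token in tokens:
--         while pos < n and input_str[pos] in " \n\t":
--             if input_str[pos] == '\n':
--                 row += 1
--                 last_nl = pos
--             pos += 1
--         positions.append((row + 1, pos - last_nl))
--         end = min(pos + len(token), n)
--         for i in range(pos, end):
--             if input_str[i] == '\n':
--                 row += 1
--                 last_nl = i
--         pos += len(token)
--     return positions
-- ===== Notes on version B (the rewrite author's own statement) =====
-- stated objective: faster
-- what changed: A rescans the whole prefix for every token (str.count and str.rfind from index 0); B makes a single left-to-right pass carrying a running newline count and last-newline index, updated while skipping whitespace and while stepping over each token.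
import Mathlib
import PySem

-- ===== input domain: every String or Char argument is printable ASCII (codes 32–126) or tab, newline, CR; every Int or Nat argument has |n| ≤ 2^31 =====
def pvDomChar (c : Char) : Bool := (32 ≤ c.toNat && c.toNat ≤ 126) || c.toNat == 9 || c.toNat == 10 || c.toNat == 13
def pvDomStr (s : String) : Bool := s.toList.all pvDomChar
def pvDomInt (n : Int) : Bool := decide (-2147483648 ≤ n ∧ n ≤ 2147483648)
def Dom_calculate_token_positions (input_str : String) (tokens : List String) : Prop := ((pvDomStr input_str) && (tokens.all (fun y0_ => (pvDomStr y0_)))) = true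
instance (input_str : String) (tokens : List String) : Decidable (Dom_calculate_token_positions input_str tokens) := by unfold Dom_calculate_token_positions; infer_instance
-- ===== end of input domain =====

-- B replaces A's per-token full rescans (str.count / str.rfind from index 0) by a single pass that
-- carries a running newline count and last-newline index; objective: faster (asymptotic).

-- ===== PORT A =====
-- while current_position < len(input_str) and input_str[current_position] in " \n\t": current_position += 1
def pvSkipA (s : List Char) (pos : Nat) : Nat :=
  if h : pos < s.length then
    if s[pos] ∈ [' ', '\n', '\t'] then pvSkipA s (pos + 1) else pos
  else pos
termination_by s.length - pos

-- exact hand port of input_str.count('\n', 0, start): number of '\n' in s[0:start]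
def pvCountNl (s : List Char) (k : Nat) : Int := ((s.take k).count '\n' : Int)

-- exact hand port of input_str.rfind('\n', 0, start): highest index of '\n' in s[0:start], -1 if none
def pvRgo : List Char → Int
  | [] => -1
  | c :: cs =>
      let r := pvRgo cs
      if 0 ≤ r then r + 1 else if c = '\n' then 0 else -1

def pvRfindNl (s : List Char) (k : Nat) : Int := pvRgo (s.take k)

def pvLoopA (s : List Char) : List String → List (Int × Int) × Nat → List (Int × Int) × Nat
  | [], st => st
  | tok :: rest, st =>
      let start := pvSkipA s st.2
      pvLoopA s rest
        (st.1 ++ [(pvCountNl s start + 1, (start : Int) - pvRfindNl s start)],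
         start + tok.toList.length)

def calculate_token_positions (input_str : String) (tokens : List String) : List (Int × Int) :=
  (pvLoopA input_str.toList tokens ([], 0)).1

-- ===== PORT B =====
-- B's whitespace-skip loop, additionally maintaining the running row / last-newline state
def pvSkipB (s : List Char) (pos : Nat) (row lastNl : Int) : Nat × Int × Int :=
  if h : pos < s.length then
    if s[pos] ∈ [' ', '\n', '\t'] then
      if s[pos] = '\n' then pvSkipB s (pos + 1) (row + 1) (pos : Int)
      else pvSkipB s (pos + 1) row lastNl
    else (pos, row, lastNl)
  else (pos, row, lastNl)
termination_by s.length - pos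

-- for i in range(pos, end): update row / last_nl on newlines
def pvAdvB (s : List Char) (i stop : Nat) (row lastNl : Int) : Int × Int :=
  if _h : i < stop then
    if s[i]? = some '\n' then pvAdvB s (i + 1) stop (row + 1) (i : Int)
    else pvAdvB s (i + 1) stop row lastNl
  else (row, lastNl)
termination_by stop - i

def pvLoopB (s : List Char) : List String → List (Int × Int) → Nat → Int → Int → List (Int × Int)
  | [], acc, _, _, _ => acc
  | tok :: rest, acc, pos, row, lastNl =>
      let r := pvSkipB s pos row lastNl
      let stop := min (r.1 + tok.toList.length) s.length
      let a := pvAdvB s r.1 stop r.2.1 r.2.2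
      pvLoopB s rest (acc ++ [(r.2.1 + 1, (r.1 : Int) - r.2.2)]) (r.1 + tok.toList.length) a.1 a.2

def calculate_token_positions_alt (input_str : String) (tokens : List String) : List (Int × Int) :=
  pvLoopB input_str.toList tokens [] 0 0 (-1)

-- ===== PRECONDITION & SPEC =====
def Spec_calculate_token_positions (input_str : String) (tokens : List String) (out : List (Int × Int)) : Prop := out = calculate_token_positions_alt input_str tokens
instance (input_str : String) (tokens : List String) (out : List (Int × Int)) : Decidable (Spec_calculate_token_positions input_str tokens out) := by unfold Spec_calculate_token_positions; infer_instance

-- ===== CLAIM (what is proved, stated in full; the proofs are below) =====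
def Claim_equal_calculate_token_positions : Prop := ∀ (input_str : String) (tokens : List String), Dom_calculate_token_positions input_str tokens → Spec_calculate_token_positions input_str tokens (calculate_token_positions input_str tokens)

-- ===== LEMMAS AND PROOFS =====

-- last-index helper: appending a char
theorem pvRgo_append (l : List Char) (c : Char) :
    pvRgo (l ++ [c]) = if c = '\n' then (l.length : Int) else pvRgo l := by
  induction l with
  | nil =>
      by_cases hc : c = '\n' <;> simp [pvRgo, hc]
  | cons d l ih =>
      simp only [List.cons_append, pvRgo, ih, List.length_cons]
      by_cases hc : c = '\n'
      · rw [if_pos hc, if_pos hc, if_pos (show (0:Int) ≤ (l.length : Int) from Int.natCast_nonneg _)]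
        push_cast
        ring
      · rw [if_neg hc, if_neg hc]

theorem pvCountNl_succ (s : List Char) (pos : Nat) (h : pos < s.length) :
    pvCountNl s (pos + 1) = pvCountNl s pos + (if s[pos] = '\n' then 1 else 0) := by
  have ht : s.take (pos + 1) = s.take pos ++ [s[pos]] := by
    rw [List.take_add_one, List.getElem?_eq_getElem h, Option.toList_some]
  rw [pvCountNl, pvCountNl, ht, List.count_append]
  by_cases hn : s[pos] = '\n'
  · rw [if_pos hn, hn]
    push_cast
    norm_num [List.count_cons]
  · rw [if_neg hn]
    have hz : [s[pos]].count '\n' = 0 := by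
      simp [List.count_cons]
      intro hcontra
      exact hn hcontra
    rw [hz]
    push_cast
    ring

theorem pvRfindNl_succ (s : List Char) (pos : Nat) (h : pos < s.length) :
    pvRfindNl s (pos + 1) = if s[pos] = '\n' then (pos : Int) else pvRfindNl s pos := by
  have ht : s.take (pos + 1) = s.take pos ++ [s[pos]] := by
    rw [List.take_add_one, List.getElem?_eq_getElem h, Option.toList_some]
  rw [pvRfindNl, pvRfindNl, ht, pvRgo_append, List.length_take,
    Nat.min_eq_left (Nat.le_of_lt h)]

theorem pvCountNl_clamp (s : List Char) (k : Nat) (h : s.length ≤ k) :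
    pvCountNl s k = pvCountNl s s.length := by
  simp [pvCountNl, List.take_of_length_le h, List.take_of_length_le (le_refl s.length)]

theorem pvRfindNl_clamp (s : List Char) (k : Nat) (h : s.length ≤ k) :
    pvRfindNl s k = pvRfindNl s s.length := by
  simp [pvRfindNl, List.take_of_length_le h, List.take_of_length_le (le_refl s.length)]

-- the skip loop of B tracks exactly A's skip position together with the count/rfind values there
theorem pvSkipB_eq (s : List Char) (pos : Nat) :
    pvSkipB s pos (pvCountNl s pos) (pvRfindNl s pos)
      = (pvSkipA s pos, pvCountNl s (pvSkipA s pos), pvRfindNl s (pvSkipA s pos)) := by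
  unfold pvSkipB pvSkipA
  split
  · rename_i h
    split
    · rename_i hmem
      by_cases hn : s[pos] = '\n'
      · rw [if_pos hn]
        have hc := pvCountNl_succ s pos h
        have hr := pvRfindNl_succ s pos h
        rw [if_pos hn] at hc hr
        rw [← hc, ← hr]
        exact pvSkipB_eq s (pos + 1)
      · rw [if_neg hn]
        have hc := pvCountNl_succ s pos h
        have hr := pvRfindNl_succ s pos h
        rw [if_neg hn] at hc hr
        simp only [add_zero] at hc
        rw [← hc, ← hr]
        exact pvSkipB_eq s (pos + 1)
    · rfl
  · rfl
termination_by s.length - pos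

-- the advance loop lands on the count/rfind values at stop
theorem pvAdvB_eq (s : List Char) (stop : Nat) (hstop : stop ≤ s.length) (i : Nat)
    (hi : i ≤ stop) :
    pvAdvB s i stop (pvCountNl s i) (pvRfindNl s i) = (pvCountNl s stop, pvRfindNl s stop) := by
  unfold pvAdvB
  split
  · rename_i hlt
    have hil : i < s.length := lt_of_lt_of_le hlt hstop
    have hget : s[i]? = some s[i] := List.getElem?_eq_getElem hil
    have hc := pvCountNl_succ s i hil
    have hr := pvRfindNl_succ s i hil
    by_cases hn : s[i] = '\n'
    · rw [if_pos (by simp [hget, hn])]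
      rw [if_pos hn] at hc hr
      rw [← hc, ← hr]
      exact pvAdvB_eq s stop hstop (i + 1) hlt
    · rw [if_neg (by simp [hget, hn])]
      rw [if_neg hn] at hc hr
      simp only [add_zero] at hc
      rw [← hc, ← hr]
      exact pvAdvB_eq s stop hstop (i + 1) hlt
  · rename_i hge
    have : i = stop := le_antisymm hi (le_of_not_gt hge)
    rw [this]
termination_by stop - i

theorem pvAdv_step (s : List Char) (p L : Nat) :
    pvAdvB s p (min (p + L) s.length) (pvCountNl s p) (pvRfindNl s p)
      = (pvCountNl s (p + L), pvRfindNl s (p + L)) := by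
  by_cases hp : p ≤ s.length
  · have h1 : min (p + L) s.length ≤ s.length := min_le_right _ _
    have h2 : p ≤ min (p + L) s.length := le_min (Nat.le_add_right _ _) hp
    rw [pvAdvB_eq s _ h1 p h2]
    by_cases hL : p + L ≤ s.length
    · rw [Nat.min_eq_left hL]
    · have hmin : min (p + L) s.length = s.length := Nat.min_eq_right (le_of_not_ge hL)
      rw [hmin, pvCountNl_clamp s (p + L) (le_of_not_ge hL),
          pvRfindNl_clamp s (p + L) (le_of_not_ge hL)]
  · have hps : s.length ≤ p := le_of_not_ge hp
    have hmin : min (p + L) s.length = s.length := Nat.min_eq_right (le_trans hps (Nat.le_add_right _ _))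
    have : ¬ p < min (p + L) s.length := by omega
    unfold pvAdvB
    rw [dif_neg this]
    rw [pvCountNl_clamp s p hps, pvRfindNl_clamp s (p + L) (by omega),
        pvCountNl_clamp s (p + L) (by omega), pvRfindNl_clamp s p hps]

theorem pvLoop_eq (s : List Char) (toks : List String) :
    ∀ acc pos, pvLoopB s toks acc pos (pvCountNl s pos) (pvRfindNl s pos)
      = (pvLoopA s toks (acc, pos)).1 := by
  induction toks with
  | nil => intro acc pos; rfl
  | cons tok rest ih =>
      intro acc pos
      simp only [pvLoopB, pvLoopA, pvSkipB_eq, pvAdv_step]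
      exact ih _ _

theorem pvCountNl_zero (s : List Char) : pvCountNl s 0 = 0 := by simp [pvCountNl]
theorem pvRfindNl_zero (s : List Char) : pvRfindNl s 0 = -1 := by simp [pvRfindNl, pvRgo]

-- ===== VERDICT (by name: the statement is the Claim_ definition above) =====
theorem calculate_token_positions_spec : Claim_equal_calculate_token_positions := by
  intro input_str tokens _
  unfold Spec_calculate_token_positions calculate_token_positions calculate_token_positions_alt
  rw [← pvCountNl_zero input_str.toList, ← pvRfindNl_zero input_str.toList]
  exact (pvLoop_eq _ _ [] 0).symm
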